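-- pv_equiv track=rewrite | github.com/UGOSSO/Advent_of_code | (2016)_second_edition/d2.py | bathroom_code
-- ===== SOURCE A (Python) =====
-- def bathroom_code(L) :
--     #array of the digicode arranged by line
--     digicode = ["123","456","789"]
--     #index of the button in the digicode array init at button 5
--     start =  [1, 1]
--     code = ''
--
--     for i in L :
--         for j in i :
--             #go in the given direction
--             if j == "L" : start[1]-=1
--             elif j == "R" : start[1]+=1
--             elif j == "U" : start[0]-=1
--             elif j == "D" : start[0]+=1
--
--             #check if we are outside of the digicode if we are return in the nearest position
--             if start[0] == -1 : start[0] = 0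
--             if start[1] == -1 : start[1] = 0
--             if start[0] == 3 : start[0] = 2
--             if start[1] == 3 : start[1] = 2
--
--         #add each number to the code
--         code+=digicode[start[0]][start[1]]
--
--     return code
-- ===== SOURCE B (Python) =====
-- # Table-driven rewrite: a neighbor map per button (missing entries = stay put)
-- # replaces the coordinate arithmetic and clamping of the original.
-- NEIGHBORS = {
--     '1': {'R': '2', 'D': '4'},
--     '2': {'L': '1', 'R': '3', 'D': '5'},
--     '3': {'L': '2', 'D': '6'},
--     '4': {'U': '1', 'R': '5', 'D': '7'},
--     '5': {'U': '2', 'L': '4', 'R': '6', 'D': '8'},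
--     '6': {'U': '3', 'L': '5', 'D': '9'},
--     '7': {'U': '4', 'R': '8'},
--     '8': {'U': '5', 'L': '7', 'R': '9'},
--     '9': {'U': '6', 'L': '8'},
-- }
--
-- def bathroom_code(L):
--     cur = '5'
--     code = ''
--     for line in L:
--         for j in line:
--             cur = NEIGHBORS[cur].get(j, cur)
--         code += cur
--     return code
-- ===== Notes on version B (the rewrite author's own statement) =====
-- stated objective: idiomatic
-- what changed: Replaces per-character coordinate arithmetic with four clamping checks and 2D string indexing by a precomputed per-button neighbor dictionary (missing entries mean the button stays), scanning with a single current-button character.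
import Mathlib
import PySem

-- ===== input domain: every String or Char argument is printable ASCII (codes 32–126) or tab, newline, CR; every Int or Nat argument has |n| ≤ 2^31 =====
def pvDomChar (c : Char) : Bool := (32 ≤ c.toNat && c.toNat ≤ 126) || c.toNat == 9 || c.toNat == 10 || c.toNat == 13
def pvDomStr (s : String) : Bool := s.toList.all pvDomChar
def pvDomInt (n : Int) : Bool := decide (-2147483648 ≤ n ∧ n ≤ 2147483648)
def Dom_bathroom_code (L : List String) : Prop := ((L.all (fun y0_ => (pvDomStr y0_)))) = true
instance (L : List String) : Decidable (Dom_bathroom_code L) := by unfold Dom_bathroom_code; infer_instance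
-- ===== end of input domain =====

-- B replaces A's coordinate arithmetic with clamping by a per-button neighbor table
-- (missing entries mean 'stay put'); objective: idiomatic, same cost.

-- ===== PORT A =====
-- one character step: move start, then clamp each coordinate back onto the keypad
def pvStepA (st : Int × Int) (j : Char) : Int × Int :=
  let st :=
    if j = 'L' then (st.1, st.2 - 1)
    else if j = 'R' then (st.1, st.2 + 1)
    else if j = 'U' then (st.1 - 1, st.2)
    else if j = 'D' then (st.1 + 1, st.2)
    else st
  let r := if st.1 = -1 then 0 else st.1
  let c := if st.2 = -1 then 0 else st.2
  let r := if r = 3 then 2 else r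
  let c := if c = 3 then 2 else c
  (r, c)

def bathroom_code (L : List String) : String :=
  let digicode : List String := ["123", "456", "789"]
  let fin := L.foldl (fun (acc : (Int × Int) × String) i =>
    let p := i.toList.foldl pvStepA acc.1
    -- digicode[start[0]][start[1]]: indices are always on the keypad, so the
    -- pyGet? lookups never return none and the defaults are never used
    let row := (PySem.List.pyGet? digicode p.1).getD ""
    let ch := (PySem.Str.pyGet? row p.2).getD ' '
    (p, acc.2.push ch)) ((1, 1), "")
  fin.2

-- ===== PORT B =====
-- NEIGHBORS dict of dicts from Source B, as insertion-ordered association lists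
def pvNeighbors : PySem.Dict Char (PySem.Dict Char Char) :=
  PySem.Dict.mk
    [('1', PySem.Dict.mk [('R', '2'), ('D', '4')]),
     ('2', PySem.Dict.mk [('L', '1'), ('R', '3'), ('D', '5')]),
     ('3', PySem.Dict.mk [('L', '2'), ('D', '6')]),
     ('4', PySem.Dict.mk [('U', '1'), ('R', '5'), ('D', '7')]),
     ('5', PySem.Dict.mk [('U', '2'), ('L', '4'), ('R', '6'), ('D', '8')]),
     ('6', PySem.Dict.mk [('U', '3'), ('L', '5'), ('D', '9')]),
     ('7', PySem.Dict.mk [('U', '4'), ('R', '8')]),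
     ('8', PySem.Dict.mk [('U', '5'), ('L', '7'), ('R', '9')]),
     ('9', PySem.Dict.mk [('U', '6'), ('L', '8')])]

-- NEIGHBORS[cur].get(j, cur); cur is always a button so the outer lookup never misses
def pvStepB (cur : Char) (j : Char) : Char :=
  PySem.Dict.getD ((PySem.Dict.get? pvNeighbors cur).getD PySem.Dict.empty) j cur

def bathroom_code_alt (L : List String) : String :=
  let fin := L.foldl (fun (acc : Char × String) line =>
    let cur := line.toList.foldl pvStepB acc.1
    (cur, acc.2.push cur)) ('5', "")
  fin.2

-- ===== PRECONDITION & SPEC =====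
def Spec_bathroom_code (L : List String) (out : String) : Prop := out = bathroom_code_alt L
instance (L : List String) (out : String) : Decidable (Spec_bathroom_code L out) := by unfold Spec_bathroom_code; infer_instance

-- ===== CLAIM (what is proved, stated in full; the proofs are below) =====
def Claim_equal_bathroom_code : Prop := ∀ (L : List String), Dom_bathroom_code L → Spec_bathroom_code L (bathroom_code L)

-- ===== LEMMAS AND PROOFS =====

-- the 9 keypad states, paired: A's coordinate with B's button character
def pvRel : List ((Int × Int) × Char) :=
  [((0,0),'1'), ((0,1),'2'), ((0,2),'3'),
   ((1,0),'4'), ((1,1),'5'), ((1,2),'6'),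
   ((2,0),'7'), ((2,1),'8'), ((2,2),'9')]

theorem pvStep_rel (j : Char) (p : Int × Int) (cur : Char)
    (h : (p, cur) ∈ pvRel) : (pvStepA p j, pvStepB cur j) ∈ pvRel := by
  fin_cases h <;>
    (by_cases h1 : j = 'L' <;> by_cases h2 : j = 'R' <;>
     by_cases h3 : j = 'U' <;> by_cases h4 : j = 'D' <;>
     first
     | (simp_all [pvStepA, pvStepB, pvNeighbors, pvRel, PySem.Dict.getD,
                  PySem.Dict.get?]; done)
     | (have e1 : ('L' == j) = false := beq_eq_false_iff_ne.mpr (Ne.symm h1)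
        have e2 : ('R' == j) = false := beq_eq_false_iff_ne.mpr (Ne.symm h2)
        have e3 : ('U' == j) = false := beq_eq_false_iff_ne.mpr (Ne.symm h3)
        have e4 : ('D' == j) = false := beq_eq_false_iff_ne.mpr (Ne.symm h4)
        simp [pvStepA, pvStepB, pvNeighbors, pvRel, PySem.Dict.getD,
              PySem.Dict.get?, List.find?, h1, h2, h3, h4, e1, e2, e3, e4]))

theorem pvSteps_rel (cs : List Char) (p : Int × Int) (cur : Char)
    (h : (p, cur) ∈ pvRel) :
    (cs.foldl pvStepA p, cs.foldl pvStepB cur) ∈ pvRel := by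
  induction cs generalizing p cur with
  | nil => exact h
  | cons c cs ih => exact ih _ _ (pvStep_rel c p cur h)

-- on related states, A's digicode lookup produces exactly B's button character
theorem pvChar_rel (p : Int × Int) (cur : Char) (h : (p, cur) ∈ pvRel) :
    ((PySem.Str.pyGet? ((PySem.List.pyGet? ["123","456","789"] p.1).getD "") p.2).getD ' ') = cur := by
  fin_cases h <;> decide

theorem pvMain (L : List String) (p : Int × Int) (cur : Char) (s : String)
    (h : (p, cur) ∈ pvRel) :
    (L.foldl (fun (acc : (Int × Int) × String) i =>
      let q := i.toList.foldl pvStepA acc.1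
      (q, acc.2.push ((PySem.Str.pyGet? ((PySem.List.pyGet? ["123","456","789"] q.1).getD "") q.2).getD ' '))) (p, s)).2
    = (L.foldl (fun (acc : Char × String) line =>
      let c := line.toList.foldl pvStepB acc.1
      (c, acc.2.push c)) (cur, s)).2 := by
  induction L generalizing p cur s with
  | nil => rfl
  | cons i L ih =>
      have hr := pvSteps_rel i.toList p cur h
      simp only [List.foldl_cons]
      rw [pvChar_rel _ _ hr]
      exact ih _ _ _ hr

-- ===== VERDICT (by name: the statement is the Claim_ definition above) =====
theorem bathroom_code_spec : Claim_equal_bathroom_code := by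
  intro L _
  unfold Spec_bathroom_code bathroom_code bathroom_code_alt
  exact pvMain L (1, 1) '5' "" (by decide)
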